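-- pv_equiv track=rewrite | github.com/DPFNeiland/Python-Environment | 2semestre/05-Dicionario/Atividade2/e5.py | calcular_MaiorOuMenor_Aluno_presenca
-- ===== SOURCE A (Python) =====
-- def calcular_MaiorOuMenor_Aluno_presenca(por_aluno: dict, PF = "P") -> list:
--
--     '''
--         por_aluno: dict
--         parte do relatório
--
--         PF:
--         sendo opcional, a variável  define se o usuário quer o aluno
--         com mais presença "P" ou o aluno mais faltante "F"
--     '''
--
--     alunoComMaisPresenca = []
--     maior = -1
--
--     for aluno, parte_aluno in por_aluno.items():
--         if parte_aluno.get(PF) > maior: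
--             maior = parte_aluno.get(PF)
--             alunoComMaisPresenca = []
--
--         if parte_aluno.get(PF) == maior:
--             alunoComMaisPresenca.append(aluno)
--
--
--     return alunoComMaisPresenca
-- ===== SOURCE B (Python) =====
-- def calcular_MaiorOuMenor_Aluno_presenca(por_aluno: dict, PF = "P") -> list:
--     # Two-pass decomposition: first find the running maximum (seeded at -1,
--     # like A), then collect every student whose count equals it.
--     maior = -1
--     for parte_aluno in por_aluno.values():
--         v = parte_aluno.get(PF)
--         if v > maior:
--             maior = v
--     return [aluno for aluno, parte_aluno in por_aluno.items()
--             if parte_aluno.get(PF) == maior]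
-- ===== Notes on version B (the rewrite author's own statement) =====
-- stated objective: simpler
-- what changed: Replaces A's one-pass tie-list-rebuild (reset the list at each new maximum) by a two-pass decomposition: first compute the maximum seeded at -1, then filter the students equal to it.
import Mathlib
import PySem

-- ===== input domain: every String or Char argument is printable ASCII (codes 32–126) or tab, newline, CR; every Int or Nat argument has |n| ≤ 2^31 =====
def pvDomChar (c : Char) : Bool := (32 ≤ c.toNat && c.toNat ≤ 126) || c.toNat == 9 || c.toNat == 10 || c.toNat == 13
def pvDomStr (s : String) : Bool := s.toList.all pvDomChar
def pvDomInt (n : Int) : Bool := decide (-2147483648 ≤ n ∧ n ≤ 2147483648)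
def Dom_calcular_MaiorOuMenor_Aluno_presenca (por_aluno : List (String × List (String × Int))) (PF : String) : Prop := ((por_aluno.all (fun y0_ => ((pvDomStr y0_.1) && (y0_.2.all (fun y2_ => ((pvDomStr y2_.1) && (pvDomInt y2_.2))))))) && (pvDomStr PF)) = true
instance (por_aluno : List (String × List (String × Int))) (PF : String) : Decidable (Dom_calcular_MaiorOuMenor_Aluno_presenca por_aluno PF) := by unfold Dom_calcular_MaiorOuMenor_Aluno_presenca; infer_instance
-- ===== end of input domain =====

-- B replaces A's one-pass reset-the-tie-list loop by a compute-max-then-filter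
-- two-pass decomposition (objective: simpler); return values proved equal on Pre_.

-- ===== PORT A =====
-- parte_aluno.get(PF): first-match association-list lookup (dict has unique keys).
-- Inside Pre_ the key is always present; the .getD 0 default is never reached there
-- (in Python a missing key makes `None > maior` raise TypeError, excluded by Pre_).
def pvGet (parte : List (String × Int)) (PF : String) : Option Int :=
  List.lookup PF parte

def calcular_MaiorOuMenor_Aluno_presenca (por_aluno : List (String × List (String × Int))) (PF : String) : List String :=
  (por_aluno.foldl
    (fun (st : List String × Int) item =>
      let v := (pvGet item.2 PF).getD 0
      let st := if v > st.2 then (([] : List String), v) else st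
      if v == st.2 then (st.1 ++ [item.1], st.2) else st)
    (([] : List String), (-1 : Int))).1

-- ===== PORT B =====
def calcular_MaiorOuMenor_Aluno_presenca_alt (por_aluno : List (String × List (String × Int))) (PF : String) : List String :=
  let maior := por_aluno.foldl
    (fun (m : Int) item =>
      let v := (pvGet item.2 PF).getD 0
      if v > m then v else m)
    (-1 : Int)
  (por_aluno.filter (fun item => (pvGet item.2 PF).getD 0 == maior)).map (·.1)

-- ===== PRECONDITION & SPEC =====
-- Pre_ excludes exactly the inputs where some student's dict lacks key PF: there
-- Python A raises TypeError (None > int), so A returns on no excluded input.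
def Pre_calcular_MaiorOuMenor_Aluno_presenca (por_aluno : List (String × List (String × Int))) (PF : String) : Prop :=
  ∀ item ∈ por_aluno, (List.lookup PF item.2).isSome

instance (por_aluno : List (String × List (String × Int))) (PF : String) : Decidable (Pre_calcular_MaiorOuMenor_Aluno_presenca por_aluno PF) := by unfold Pre_calcular_MaiorOuMenor_Aluno_presenca; infer_instance

def pvWitness_calcular_MaiorOuMenor_Aluno_presenca : (List (String × List (String × Int))) × String :=
  ([("ana", [("P", 3), ("F", 1)]), ("bia", [("P", 3)]), ("caio", [("P", 2)])], "P")

def Spec_calcular_MaiorOuMenor_Aluno_presenca (por_aluno : List (String × List (String × Int))) (PF : String) (out : List String) : Prop := out = calcular_MaiorOuMenor_Aluno_presenca_alt por_aluno PF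
instance (por_aluno : List (String × List (String × Int))) (PF : String) (out : List String) : Decidable (Spec_calcular_MaiorOuMenor_Aluno_presenca por_aluno PF out) := by unfold Spec_calcular_MaiorOuMenor_Aluno_presenca; infer_instance

-- ===== CLAIM (what is proved, stated in full; the proofs are below) =====
def Claim_equal_calcular_MaiorOuMenor_Aluno_presenca : Prop := ∀ (por_aluno : List (String × List (String × Int))) (PF : String), Dom_calcular_MaiorOuMenor_Aluno_presenca por_aluno PF → Pre_calcular_MaiorOuMenor_Aluno_presenca por_aluno PF → Spec_calcular_MaiorOuMenor_Aluno_presenca por_aluno PF (calcular_MaiorOuMenor_Aluno_presenca por_aluno PF)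

-- ===== LEMMAS AND PROOFS =====

-- the step functions of the two ports, named for the proofs
def stepA (PF : String) (st : List String × Int) (item : String × List (String × Int)) : List String × Int :=
  let v := (pvGet item.2 PF).getD 0
  let st := if v > st.2 then (([] : List String), v) else st
  if v == st.2 then (st.1 ++ [item.1], st.2) else st

def stepM (PF : String) (m : Int) (item : String × List (String × Int)) : Int :=
  let v := (pvGet item.2 PF).getD 0
  if v > m then v else m

theorem stepM_le (PF : String) (xs : List (String × List (String × Int))) (m : Int) :
    m ≤ xs.foldl (stepM PF) m := by
  induction xs generalizing m with
  | nil => exact le_refl m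
  | cons x xs ih =>
    have h : m ≤ stepM PF m x := by
      simp only [stepM]
      split <;> omega
    exact le_trans h (ih _)

-- invariant of A's fold: the final maximum is the seeded running max, and the
-- list is the kept accumulator (iff the max never moved) followed by the filter
theorem foldA_char (PF : String) (xs : List (String × List (String × Int)))
    (acc : List String) (m : Int) :
    xs.foldl (stepA PF) (acc, m) =
      ((if xs.foldl (stepM PF) m == m then acc else []) ++
        (xs.filter (fun item => (pvGet item.2 PF).getD 0 == xs.foldl (stepM PF) m)).map (·.1),
       xs.foldl (stepM PF) m) := by
  induction xs generalizing acc m with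
  | nil => simp
  | cons x xs ih =>
    set v := (pvGet x.2 PF).getD 0 with hv
    have hs : stepM PF m x = if v > m then v else m := rfl
    by_cases hgt : v > m
    · have hstepA : stepA PF (acc, m) x = ([x.1], v) := by
        simp [stepA, ← hv, hgt]
      have hM : xs.foldl (stepM PF) (stepM PF m x) = xs.foldl (stepM PF) v := by
        rw [hs]; simp [hgt]
      have hvle : v ≤ xs.foldl (stepM PF) v := stepM_le PF xs v
      have hMne : (xs.foldl (stepM PF) v == m) = false := by
        simp only [beq_eq_false_iff_ne, ne_eq]
        omega
      simp only [List.foldl_cons, hstepA, ih, hM, List.filter_cons, ← hv, hMne]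
      by_cases hveq : v = xs.foldl (stepM PF) v
      · simp [← hveq]
      · have h1 : (v == xs.foldl (stepM PF) v) = false := by simpa using hveq
        simp [h1]; exact fun h => hveq h.symm
    · have hM : xs.foldl (stepM PF) (stepM PF m x) = xs.foldl (stepM PF) m := by
        rw [hs]; simp [hgt]
      by_cases heq : v = m
      · have hstepA : stepA PF (acc, m) x = (acc ++ [x.1], m) := by
          simp [stepA, ← hv, heq]
        simp only [List.foldl_cons, hstepA, ih, hM, List.filter_cons, ← hv]
        by_cases hMm : xs.foldl (stepM PF) m = m
        · have h1 : (xs.foldl (stepM PF) m == m) = true := by simpa using hMm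
          have h2 : (v == xs.foldl (stepM PF) m) = true := by simp [heq, hMm]
          simp [h1, h2]
        · have h1 : (xs.foldl (stepM PF) m == m) = false := by simpa using hMm
          have h2 : (v == xs.foldl (stepM PF) m) = false := by
            simp only [beq_eq_false_iff_ne, ne_eq]; omega
          simp [h1, h2]
      · have hstepA : stepA PF (acc, m) x = (acc, m) := by
          simp [stepA, ← hv, hgt, heq]
        have hmle : m ≤ xs.foldl (stepM PF) m := stepM_le PF xs m
        have h2 : (v == xs.foldl (stepM PF) m) = false := by
          simp only [beq_eq_false_iff_ne, ne_eq]; omega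
        simp only [List.foldl_cons, hstepA, ih, hM, List.filter_cons, ← hv, h2]
        simp

-- ===== VERDICT (by name: the statement is the Claim_ definition above) =====
theorem calcular_MaiorOuMenor_Aluno_presenca_spec : Claim_equal_calcular_MaiorOuMenor_Aluno_presenca := by
  intro por_aluno PF _ _
  show calcular_MaiorOuMenor_Aluno_presenca por_aluno PF = calcular_MaiorOuMenor_Aluno_presenca_alt por_aluno PF
  unfold calcular_MaiorOuMenor_Aluno_presenca calcular_MaiorOuMenor_Aluno_presenca_alt
  have h := foldA_char PF por_aluno [] (-1)
  simp only [show (fun (st : List String × Int) item =>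
      let v := (pvGet item.2 PF).getD 0
      let st := if v > st.2 then (([] : List String), v) else st
      if v == st.2 then (st.1 ++ [item.1], st.2) else st) = stepA PF from rfl,
    show (fun (m : Int) item => let v := (pvGet item.2 PF).getD 0; if v > m then v else m) = stepM PF from rfl]
  rw [h]
  split <;> simp
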